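-- pv_equiv track=rewrite | github.com/D1MK4real/Minimum-dominating-set-algorithm | fast_algo.py | move_set_from_FREE_to_IN_special_BN
-- ===== SOURCE A (Python) =====
-- def move_set_from_FREE_to_IN_special_BN(first, SET, graph, IN, BN, LN, FL, FREE):
--     FREE_copy = FREE.copy().difference(SET)
--     IN_copy = IN.copy().union(SET).union({first})
--     FL_copy = FL.copy()
--     BN_copy = BN.copy().difference({first})
--     LN_copy = LN.copy()
--     for v in (SET.union({first})):
--         y = set([elem for elem in graph[v]]).intersection(FREE_copy)
--         y2 = set([elem for elem in graph[v]]).intersection(FL_copy)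
--         FREE_copy = FREE_copy.difference(y)
--         FL_copy = FL_copy.difference(y2)
--         BN_copy = BN_copy.union(y)
--         LN_copy = LN_copy.union(y2)
--
--     return IN_copy, BN_copy, LN_copy, FL_copy, FREE_copy
-- ===== SOURCE B (Python) =====
-- def move_set_from_FREE_to_IN_special_BN(first, SET, graph, IN, BN, LN, FL, FREE):
--     N = set().union(*(graph[v] for v in SET | {first}))
--     FS = FREE - SET
--     return (IN | SET | {first},
--             (BN - {first}) | (N & FS),
--             LN | (N & FL),
--             FL - N,
--             FS - N)
-- ===== Notes on version B (the rewrite author's own statement) =====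
-- stated objective: simpler
-- what changed: Replaces the per-vertex loop that incrementally moves neighbours between FREE/FL and BN/LN with a single bulk neighbourhood union N followed by one-shot set algebra (FS-N, (BN-{first})|(N&FS), LN|(N&FL), FL-N).
import Mathlib
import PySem

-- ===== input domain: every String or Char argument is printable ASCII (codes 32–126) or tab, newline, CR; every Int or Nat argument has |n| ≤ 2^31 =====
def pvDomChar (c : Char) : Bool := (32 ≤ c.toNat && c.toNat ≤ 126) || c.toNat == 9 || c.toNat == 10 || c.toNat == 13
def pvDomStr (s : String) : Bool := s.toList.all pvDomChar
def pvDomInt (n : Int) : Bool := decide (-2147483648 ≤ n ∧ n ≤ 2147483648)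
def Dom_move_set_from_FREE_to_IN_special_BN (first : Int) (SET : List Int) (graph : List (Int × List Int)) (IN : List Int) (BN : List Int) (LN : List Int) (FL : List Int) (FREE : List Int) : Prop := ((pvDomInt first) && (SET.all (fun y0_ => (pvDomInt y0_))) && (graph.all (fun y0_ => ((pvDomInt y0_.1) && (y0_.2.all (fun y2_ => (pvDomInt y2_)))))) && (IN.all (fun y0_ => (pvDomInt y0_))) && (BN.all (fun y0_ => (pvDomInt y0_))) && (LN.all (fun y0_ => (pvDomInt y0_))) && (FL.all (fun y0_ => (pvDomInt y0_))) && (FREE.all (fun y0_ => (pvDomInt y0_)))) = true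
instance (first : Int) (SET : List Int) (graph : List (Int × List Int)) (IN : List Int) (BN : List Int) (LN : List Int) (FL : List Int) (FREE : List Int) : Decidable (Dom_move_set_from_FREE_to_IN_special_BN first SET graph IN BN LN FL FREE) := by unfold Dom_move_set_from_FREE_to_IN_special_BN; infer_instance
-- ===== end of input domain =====

-- B replaces A's per-vertex loop by one bulk neighbourhood union N and one-shot set algebra
-- (objective: simpler); equal return value proved, no argument is mutated by either version.


-- ===== PORT A =====
-- graph[v] : Dict lookup; total via getD [] — Pre_ excludes the KeyError inputs (missing key)
def pvLookup (graph : List (Int × List Int)) (v : Int) : List Int :=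
  PySem.Dict.getD (PySem.Dict.mk graph) v []

-- one iteration of A's 'for v in SET.union({first})' body on the state (FREE_copy, FL_copy, BN_copy, LN_copy)
def pvStepA (graph : List (Int × List Int))
    (st : List Int × List Int × List Int × List Int) (v : Int) :
    List Int × List Int × List Int × List Int :=
  let y := PySem.Set.inter (PySem.Set.ofList (pvLookup graph v)) st.1
  let y2 := PySem.Set.inter (PySem.Set.ofList (pvLookup graph v)) st.2.1
  (PySem.Set.diff st.1 y, PySem.Set.diff st.2.1 y2,
   PySem.Set.union st.2.2.1 y, PySem.Set.union st.2.2.2 y2)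

def move_set_from_FREE_to_IN_special_BN (first : Int) (SET : List Int) (graph : List (Int × List Int)) (IN : List Int) (BN : List Int) (LN : List Int) (FL : List Int) (FREE : List Int) : List Int × List Int × List Int × List Int × List Int :=
  let FREE_copy := PySem.Set.diff FREE SET
  let IN_copy := PySem.Set.union (PySem.Set.union IN SET) [first]
  let FL_copy := FL
  let BN_copy := PySem.Set.diff BN [first]
  let LN_copy := LN
  let st := (PySem.Set.union SET [first]).foldl (pvStepA graph) (FREE_copy, FL_copy, BN_copy, LN_copy)
  (IN_copy, st.2.2.1, st.2.2.2, st.2.1, st.1)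

-- ===== PORT B =====
def move_set_from_FREE_to_IN_special_BN_alt (first : Int) (SET : List Int) (graph : List (Int × List Int)) (IN : List Int) (BN : List Int) (LN : List Int) (FL : List Int) (FREE : List Int) : List Int × List Int × List Int × List Int × List Int :=
  -- N = set().union(*(graph[v] for v in SET | {first}))
  let N := (PySem.Set.union SET [first]).foldl
      (fun acc v => PySem.Set.update acc (PySem.Dict.getD (PySem.Dict.mk graph) v [])) PySem.Set.empty
  let FS := PySem.Set.diff FREE SET
  (PySem.Set.union (PySem.Set.union IN SET) [first],
   PySem.Set.union (PySem.Set.diff BN [first]) (PySem.Set.inter N FS),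
   PySem.Set.union LN (PySem.Set.inter N FL),
   PySem.Set.diff FL N,
   PySem.Set.diff FS N)

-- ===== PRECONDITION & SPEC =====
-- Pre_ excludes exactly the KeyError inputs: A (and B) raise when some v in SET ∪ {first} is not a key of graph.
def Pre_move_set_from_FREE_to_IN_special_BN (first : Int) (SET : List Int) (graph : List (Int × List Int)) (IN : List Int) (BN : List Int) (LN : List Int) (FL : List Int) (FREE : List Int) : Prop :=
  ∀ v ∈ first :: SET, (graph.any (fun p => p.1 == v)) = true
instance (first : Int) (SET : List Int) (graph : List (Int × List Int)) (IN : List Int) (BN : List Int) (LN : List Int) (FL : List Int) (FREE : List Int) : Decidable (Pre_move_set_from_FREE_to_IN_special_BN first SET graph IN BN LN FL FREE) := by unfold Pre_move_set_from_FREE_to_IN_special_BN; infer_instance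

def pvWitness_move_set_from_FREE_to_IN_special_BN : Int × List Int × (List (Int × List Int)) × List Int × List Int × List Int × List Int × List Int :=
  (0, [1], [(0, [1, 2]), (1, [3])], [], [5], [], [4], [2, 3, 4])

def Spec_move_set_from_FREE_to_IN_special_BN (first : Int) (SET : List Int) (graph : List (Int × List Int)) (IN : List Int) (BN : List Int) (LN : List Int) (FL : List Int) (FREE : List Int) (out : List Int × List Int × List Int × List Int × List Int) : Prop := out = move_set_from_FREE_to_IN_special_BN_alt first SET graph IN BN LN FL FREE
instance (first : Int) (SET : List Int) (graph : List (Int × List Int)) (IN : List Int) (BN : List Int) (LN : List Int) (FL : List Int) (FREE : List Int) (out : List Int × List Int × List Int × List Int × List Int) : Decidable (Spec_move_set_from_FREE_to_IN_special_BN first SET graph IN BN LN FL FREE out) := by unfold Spec_move_set_from_FREE_to_IN_special_BN; infer_instance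

-- ===== CLAIM (what is proved, stated in full; the proofs are below) =====
def Claim_equal_move_set_from_FREE_to_IN_special_BN : Prop := ∀ (first : Int) (SET : List Int) (graph : List (Int × List Int)) (IN : List Int) (BN : List Int) (LN : List Int) (FL : List Int) (FREE : List Int), Dom_move_set_from_FREE_to_IN_special_BN first SET graph IN BN LN FL FREE → Pre_move_set_from_FREE_to_IN_special_BN first SET graph IN BN LN FL FREE → Spec_move_set_from_FREE_to_IN_special_BN first SET graph IN BN LN FL FREE (move_set_from_FREE_to_IN_special_BN first SET graph IN BN LN FL FREE)

-- ===== LEMMAS AND PROOFS =====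

theorem pv_L1 (F a : List Int) :
    PySem.Set.diff F (PySem.Set.inter (PySem.Set.ofList a) F) = PySem.Set.diff F a := by
  simp only [PySem.Set.diff, PySem.Set.inter]
  apply List.filter_congr
  intro x hx
  simp [PySem.Set.mem_ofList, hx]

theorem pv_L2 (F a b : List Int) :
    PySem.Set.diff (PySem.Set.diff F a) b = PySem.Set.diff F (a ++ b) := by
  simp only [PySem.Set.diff, List.filter_filter]
  apply List.filter_congr
  intro x hx
  rw [Bool.and_comm]
  simp

theorem pv_L3 (s a b : List Int) :
    PySem.Set.union (PySem.Set.union s a) b = PySem.Set.union s (a ++ b) := by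
  simp [PySem.Set.union, PySem.Set.update_append]

theorem pv_L5 (F t : List Int) :
    PySem.Set.diff F (PySem.Set.ofList t) = PySem.Set.diff F t := by
  simp only [PySem.Set.diff]
  apply List.filter_congr
  intro x hx
  simp [PySem.Set.mem_ofList]

theorem pv_L4 (F a b : List Int) :
    PySem.Set.inter (PySem.Set.ofList (a ++ b)) F =
      PySem.Set.inter (PySem.Set.ofList a) F ++ PySem.Set.inter (PySem.Set.ofList b) (PySem.Set.diff F a) := by
  rw [PySem.Set.ofList_append, PySem.Set.update_eq_append_filter]
  simp only [PySem.Set.inter, List.filter_append, List.filter_filter]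
  congr 1
  apply List.filter_congr
  intro x hx
  simp [PySem.Set.mem_ofList, PySem.Set.diff]

-- A's loop in closed form: folding pvStepA over L is set algebra on the flattened neighbourhoods
theorem pv_loopA (graph : List (Int × List Int)) (L F FLc BNc LNc : List Int) :
    L.foldl (pvStepA graph) (F, FLc, BNc, LNc) =
      (PySem.Set.diff F (L.flatMap (pvLookup graph)),
       PySem.Set.diff FLc (L.flatMap (pvLookup graph)),
       PySem.Set.union BNc (PySem.Set.inter (PySem.Set.ofList (L.flatMap (pvLookup graph))) F),
       PySem.Set.union LNc (PySem.Set.inter (PySem.Set.ofList (L.flatMap (pvLookup graph))) FLc)) := by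
  induction L generalizing F FLc BNc LNc with
  | nil => simp [PySem.Set.diff, PySem.Set.union, PySem.Set.inter, PySem.Set.ofList, PySem.Set.update]
  | cons v L ih =>
      simp only [List.foldl_cons, List.flatMap_cons]
      rw [show pvStepA graph (F, FLc, BNc, LNc) v =
          (PySem.Set.diff F (pvLookup graph v), PySem.Set.diff FLc (pvLookup graph v),
           PySem.Set.union BNc (PySem.Set.inter (PySem.Set.ofList (pvLookup graph v)) F),
           PySem.Set.union LNc (PySem.Set.inter (PySem.Set.ofList (pvLookup graph v)) FLc)) from by
        simp [pvStepA, pv_L1]]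
      rw [ih]
      rw [pv_L2, pv_L2, pv_L4, pv_L4, ← pv_L3, ← pv_L3]

-- B's N is the deduplicated flattened neighbourhood list
theorem pv_N_eq (graph : List (Int × List Int)) (L : List Int) :
    L.foldl (fun acc v => PySem.Set.update acc (PySem.Dict.getD (PySem.Dict.mk graph) v [])) PySem.Set.empty =
      PySem.Set.ofList (L.flatMap (fun v => PySem.Dict.getD (PySem.Dict.mk graph) v [])) := by
  suffices h : ∀ s : List Int, L.foldl (fun acc v => PySem.Set.update acc (PySem.Dict.getD (PySem.Dict.mk graph) v [])) s =
      PySem.Set.update s (L.flatMap (fun v => PySem.Dict.getD (PySem.Dict.mk graph) v [])) by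
    simpa [PySem.Set.empty, PySem.Set.update_empty] using h PySem.Set.empty
  induction L with
  | nil => intro s; simp [PySem.Set.update]
  | cons v L ih => intro s; simp [List.foldl_cons, ih, PySem.Set.update_append]

theorem pv_main (first : Int) (SET : List Int) (graph : List (Int × List Int)) (IN : List Int) (BN : List Int) (LN : List Int) (FL : List Int) (FREE : List Int) :
    move_set_from_FREE_to_IN_special_BN first SET graph IN BN LN FL FREE =
      move_set_from_FREE_to_IN_special_BN_alt first SET graph IN BN LN FL FREE := by
  simp only [move_set_from_FREE_to_IN_special_BN, move_set_from_FREE_to_IN_special_BN_alt]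
  rw [pv_loopA, pv_N_eq, pv_L5, pv_L5]
  rfl

-- ===== VERDICT (by name: the statement is the Claim_ definition above) =====
theorem move_set_from_FREE_to_IN_special_BN_spec : Claim_equal_move_set_from_FREE_to_IN_special_BN := by
  intro first SET graph IN BN LN FL FREE _ _
  exact pv_main first SET graph IN BN LN FL FREE
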